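-- pv_equiv track=rewrite | github.com/n3k/test_code_for_fun | branches/prediciton.py | process
-- ===== SOURCE A (Python) =====
-- def process(numbers):
--     sum_of_elements_below_512 = 0
--     total = 0
--
--     for x in numbers:
--         if x < 512:
--             sum_of_elements_below_512 += x
--         total += x
--
--     return (sum_of_elements_below_512, total)
-- ===== SOURCE B (Python) =====
-- def process(numbers):
--     return (sum(x for x in numbers if x < 512), sum(numbers))
-- ===== Notes on version B (the rewrite author's own statement) =====
-- stated objective: simpler
-- what changed: Replaced the single fused loop with two accumulators by two independent passes delegated to sum: a filtered generator for the below-512 sum and sum(numbers) for the total.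
import Mathlib
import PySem

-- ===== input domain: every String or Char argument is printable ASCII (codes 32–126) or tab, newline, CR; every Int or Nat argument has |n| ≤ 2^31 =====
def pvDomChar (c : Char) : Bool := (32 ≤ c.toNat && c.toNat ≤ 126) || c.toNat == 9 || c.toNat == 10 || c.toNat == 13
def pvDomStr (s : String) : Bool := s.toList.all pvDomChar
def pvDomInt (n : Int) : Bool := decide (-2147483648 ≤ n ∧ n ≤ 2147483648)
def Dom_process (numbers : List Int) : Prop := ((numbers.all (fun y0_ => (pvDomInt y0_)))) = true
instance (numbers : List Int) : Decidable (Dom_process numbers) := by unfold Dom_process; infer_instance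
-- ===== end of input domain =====

-- ===== PORT A =====
-- B: two independent passes via sum (filtered and total) instead of A's fused two-accumulator loop; objective: simpler.
def process (numbers : List Int) : Int × Int :=
  numbers.foldl
    (fun acc x =>
      let below := if x < 512 then acc.1 + x else acc.1
      (below, acc.2 + x))
    (0, 0)

-- ===== PORT B =====
def process_alt (numbers : List Int) : Int × Int :=
  ((numbers.filter (fun x => x < 512)).sum, numbers.sum)

-- ===== PRECONDITION & SPEC =====
def Spec_process (numbers : List Int) (out : Int × Int) : Prop := out = process_alt numbers
instance (numbers : List Int) (out : Int × Int) : Decidable (Spec_process numbers out) := by unfold Spec_process; infer_instance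

-- ===== CLAIM (what is proved, stated in full; the proofs are below) =====
def Claim_equal_process : Prop := ∀ (numbers : List Int), Dom_process numbers → Spec_process numbers (process numbers)

-- ===== LEMMAS AND PROOFS =====

-- ===== VERDICT (by name: the statement is the Claim_ definition above) =====
theorem process_foldl_shift (numbers : List Int) (a b : Int) :
    numbers.foldl
      (fun acc x =>
        let below := if x < 512 then acc.1 + x else acc.1
        (below, acc.2 + x)) (a, b)
      = (a + (numbers.filter (fun x => x < 512)).sum, b + numbers.sum) := by
  induction numbers generalizing a b with
  | nil => simp
  | cons x xs ih =>
    simp only [List.foldl_cons, List.filter_cons, List.sum_cons, ih]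
    by_cases h : x < 512 <;> simp [h, Prod.ext_iff] <;> ring_nf <;> simp [add_assoc]

theorem process_spec : Claim_equal_process := by
  intro numbers _
  unfold Spec_process process process_alt
  rw [process_foldl_shift]
  simp
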